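-- pv_equiv track=rewrite | github.com/warriorframework/warriorframework | katana/utils/string_utils.py | split_str_at_last_index
-- ===== SOURCE A (Python) =====
-- def split_str_at_last_index(str, split_at):
--     """
--     This function splits a string at the last index of the character in "split_at"
--     Args:
--         str: String to be split
--         split_at: Character at which the string should be split
--
--     Returns:
--
--         output = remaining string after splitting
--
--     """
--     temp = str.split(split_at)
--
--     output = ""
--     for j in range(0, len(temp) - 1):
--         output += temp[j]
--         output += split_at
--
--     output = output.strip(split_at)
--
--     return output
-- ===== SOURCE B (Python) =====
-- def split_str_at_last_index(str, split_at):
--     head = str.rpartition(split_at)[0]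
--     return head.strip(split_at)
-- ===== Notes on version B (the rewrite author's own statement) =====
-- stated objective: idiomatic
-- what changed: B locates the last separator directly from the right with one rpartition (rfind) instead of splitting the string into all segments and rejoining all but the last in a loop, then strips the same character set.
import Mathlib
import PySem

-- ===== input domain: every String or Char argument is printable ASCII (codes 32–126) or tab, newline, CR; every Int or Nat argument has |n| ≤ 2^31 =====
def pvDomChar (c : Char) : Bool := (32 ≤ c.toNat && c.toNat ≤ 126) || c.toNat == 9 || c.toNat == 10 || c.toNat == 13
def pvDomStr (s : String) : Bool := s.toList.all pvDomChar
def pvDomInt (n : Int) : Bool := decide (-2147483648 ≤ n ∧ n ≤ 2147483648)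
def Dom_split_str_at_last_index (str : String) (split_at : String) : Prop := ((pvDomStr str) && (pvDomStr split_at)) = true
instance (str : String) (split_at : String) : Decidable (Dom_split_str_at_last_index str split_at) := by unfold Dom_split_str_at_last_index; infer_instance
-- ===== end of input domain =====

-- B replaces A's split-into-all-segments-then-rejoin loop by one right-to-left rpartition
-- (locate the LAST separator directly and keep the part before it), then the same strip.

-- ===== PORT A =====
def split_str_at_last_index (str : String) (split_at : String) : String :=
  match PySem.Str.split? str split_at with
  | none => ""   -- Python raises ValueError here (empty separator); excluded by Pre_
  | some temp =>
      let output := (PySem.List.pyRange 0 (PySem.List.len temp - 1) 1).foldl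
        (fun output j => output ++ PySem.List.pyGetD temp j "" ++ split_at) ""
      PySem.Str.stripChars output split_at

-- ===== PORT B =====
-- hand port of str.rpartition(sep) (head component only), exact for sep ≠ "":
-- head = str[:i] at the highest occurrence i of sep, or "" when sep does not occur.
-- (Python raises ValueError for sep = ""; that input is excluded by Pre_.)
def pyRpartitionHead (s : String) (sep : String) : String :=
  let i := PySem.Str.rfind s sep
  if i < 0 then "" else PySem.Str.slice s none (some i)

def split_str_at_last_index_alt (str : String) (split_at : String) : String :=
  PySem.Str.stripChars (pyRpartitionHead str split_at) split_at

-- ===== PRECONDITION & SPEC =====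
-- Pre_ excludes only split_at = "", where Python A (str.split('')) raises ValueError (B's rpartition raises too).
def Pre_split_str_at_last_index (str : String) (split_at : String) : Prop := split_at ≠ ""
instance (str : String) (split_at : String) : Decidable (Pre_split_str_at_last_index str split_at) := by unfold Pre_split_str_at_last_index; infer_instance
def pvWitness_split_str_at_last_index : String × String := ("a-b-c", "-")

def Spec_split_str_at_last_index (str : String) (split_at : String) (out : String) : Prop := out = split_str_at_last_index_alt str split_at
instance (str : String) (split_at : String) (out : String) : Decidable (Spec_split_str_at_last_index str split_at out) := by unfold Spec_split_str_at_last_index; infer_instance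

-- ===== CLAIM (what is proved, stated in full; the proofs are below) =====
def Claim_equal_split_str_at_last_index : Prop := ∀ (str : String) (split_at : String), Dom_split_str_at_last_index str split_at → Pre_split_str_at_last_index str split_at → Spec_split_str_at_last_index str split_at (split_str_at_last_index str split_at)

-- ===== LEMMAS AND PROOFS =====

-- Reference (fuel-free) form of PySem.Chars.splitOn, faithful for sep ≠ [].
def splitRef (sep l cur : List Char) : List (List Char) :=
  match l with
  | [] => [cur.reverse]
  | c :: rest =>
      if h : sep ≠ [] ∧ sep.isPrefixOf (c :: rest) then
        cur.reverse :: splitRef sep ((c :: rest).drop sep.length) []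
      else
        splitRef sep rest (c :: cur)
termination_by l.length
decreasing_by
  · have hs : 1 ≤ sep.length := by
      cases sep with
      | nil => exact absurd rfl h.1
      | cons a t => simp
    simp [List.length_drop]; omega
  · simp

theorem splitOn_go_eq (sep : List Char) (hsep : sep ≠ []) :
    ∀ (fuel : Nat) (l cur : List Char) (acc : List (List Char)), l.length < fuel →
      PySem.Chars.splitOn.go sep fuel l cur acc = acc.reverse ++ splitRef sep l cur := by
  intro fuel
  induction fuel with
  | zero => intro l cur acc h; omega
  | succ fuel ih =>
      intro l cur acc h
      cases l with
      | nil => simp [PySem.Chars.splitOn.go, splitRef]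
      | cons c rest =>
          by_cases hp : sep.isPrefixOf (c :: rest) = true
          · have hs : 1 ≤ sep.length := by
              cases sep with
              | nil => exact absurd rfl hsep
              | cons a t => simp
            rw [show PySem.Chars.splitOn.go sep (fuel+1) (c :: rest) cur acc
                = PySem.Chars.splitOn.go sep fuel ((c :: rest).drop sep.length) []
                    (cur.reverse :: acc) from by simp [PySem.Chars.splitOn.go, hp]]
            rw [ih _ _ _ (by simp [List.length_drop] at *; omega)]
            rw [show splitRef sep (c :: rest) cur
                = cur.reverse :: splitRef sep ((c :: rest).drop sep.length) [] from by
                  rw [splitRef]; simp [hsep, hp]]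
            simp
          · rw [show PySem.Chars.splitOn.go sep (fuel+1) (c :: rest) cur acc
                = PySem.Chars.splitOn.go sep fuel rest (c :: cur) acc from by
                  simp [PySem.Chars.splitOn.go, hp]]
            rw [ih _ _ _ (by simp at h ⊢; omega)]
            rw [show splitRef sep (c :: rest) cur = splitRef sep rest (c :: cur) from by
                  rw [splitRef]; simp [hp]]

theorem splitOn_eq_splitRef (s sep : List Char) (hsep : sep ≠ []) :
    PySem.Chars.splitOn s sep = splitRef sep s [] := by
  unfold PySem.Chars.splitOn
  rw [splitOn_go_eq sep hsep (s.length + 1) s [] [] (by omega)]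
  simp

theorem splitRef_ne_nil (sep l cur : List Char) : splitRef sep l cur ≠ [] := by
  fun_induction splitRef with
  | case1 => simp
  | case2 => simp
  | case3 _ _ _ _ ih => exact ih

theorem splitRef_flat (sep : List Char) (hsep : sep ≠ []) :
    ∀ (l cur : List Char),
      ((splitRef sep l cur).dropLast.flatMap (· ++ sep)) ++ (splitRef sep l cur).getLastD []
        = cur.reverse ++ l := by
  intro l cur
  fun_induction splitRef sep l cur with
  | case1 cur => simp
  | case2 cur c rest h ih =>
      obtain ⟨r, rs, hR⟩ := List.exists_cons_of_ne_nil
        (splitRef_ne_nil sep ((c :: rest).drop sep.length) [])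
      rw [hR] at ih ⊢
      have hpre : sep ++ (c :: rest).drop sep.length = c :: rest := by
        have := (List.isPrefixOf_iff_prefix).mp h.2
        exact (List.prefix_iff_eq_append.mp this)
      simp only [List.dropLast_cons_of_ne_nil (by simp : (r :: rs : List (List Char)) ≠ []),
        List.flatMap_cons, List.getLastD_cons] at *
      calc cur.reverse ++ sep ++ ((r :: rs).dropLast.flatMap (· ++ sep))
          ++ (rs.getLastD r)
          = cur.reverse ++ sep ++ (((r :: rs).dropLast.flatMap (· ++ sep)) ++ rs.getLastD r) := by
            simp [List.append_assoc]
        _ = cur.reverse ++ sep ++ ((c :: rest).drop sep.length) := by rw [ih]; simp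
        _ = cur.reverse ++ (c :: rest) := by rw [List.append_assoc, hpre]
  | case3 cur c rest h ih => rw [ih]; simp

theorem splitRef_last_noOcc (sep : List Char) (hsep : sep ≠ []) :
    ∀ (l cur : List Char),
      (∀ j, j < cur.length → ¬ sep.isPrefixOf ((cur.reverse ++ l).drop j) = true) →
      ∀ j, ¬ sep.isPrefixOf (((splitRef sep l cur).getLastD []).drop j) = true := by
  intro l cur
  fun_induction splitRef sep l cur with
  | case1 cur =>
      intro hinv j
      simp only [List.getLastD_cons, List.getLastD_nil]
      by_cases hj : j < cur.length
      · have := hinv j hj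
        simpa using this
      · have : (cur.reverse.drop j) = [] := by
          apply List.drop_eq_nil_of_le; simp; omega
        rw [this]
        cases sep with
        | nil => exact absurd rfl hsep
        | cons a t => simp
  | case2 cur c rest h ih =>
      intro _ j
      obtain ⟨r, rs, hR⟩ := List.exists_cons_of_ne_nil
        (splitRef_ne_nil sep ((c :: rest).drop sep.length) [])
      rw [hR] at ih ⊢
      simp only [List.getLastD_cons]
      have := ih (by intro j' hj'; simp at hj') j
      simp only [List.getLastD_cons] at this
      exact this
  | case3 cur c rest h ih =>
      intro hinv j
      apply ih
      intro j' hj'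
      simp only [List.reverse_cons, List.append_assoc, List.singleton_append]
      by_cases hlt : j' < cur.length
      · have := hinv j' hlt
        simpa using this
      · have hj'' : j' = cur.length := by simp at hj'; omega
        subst hj''
        have hdrop : (cur.reverse ++ c :: rest).drop cur.length = c :: rest := by
          have : cur.length = cur.reverse.length := by simp
          rw [this, List.drop_left]
        rw [hdrop]
        intro hpre
        exact h ⟨hsep, hpre⟩

theorem rfind_go_noOcc (s sub : List Char)
    (h : ∀ j, ¬ sub.isPrefixOf (s.drop j) = true) :
    ∀ k, PySem.Chars.rfind.go s sub k = -1 := by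
  intro k
  induction k with
  | zero =>
      have h0 := h 0
      simp only [List.drop_zero] at h0
      simp [PySem.Chars.rfind.go, h0]
  | succ k ih =>
      have hk := h (k + 1)
      simp [PySem.Chars.rfind.go, hk, ih]

theorem rfind_go_found (s sub : List Char) :
    ∀ (k j : Nat), j ≤ k → sub.isPrefixOf (s.drop j) = true →
      ∃ i : Nat, PySem.Chars.rfind.go s sub k = (i : Int) ∧ j ≤ i ∧
        sub.isPrefixOf (s.drop i) = true ∧
        ∀ j' : Nat, i < j' → j' ≤ k → ¬ sub.isPrefixOf (s.drop j') = true := by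
  intro k
  induction k with
  | zero =>
      intro j hj hpre
      have hj0 : j = 0 := by omega
      subst hj0
      simp only [List.drop_zero] at hpre
      refine ⟨0, by simp [PySem.Chars.rfind.go, hpre], le_refl _, by simpa using hpre, ?_⟩
      intro j' h1 h2; omega
  | succ k ih =>
      intro j hj hpre
      by_cases hp : sub.isPrefixOf (s.drop (k + 1)) = true
      · refine ⟨k + 1, by simp [PySem.Chars.rfind.go, hp], by omega, hp, ?_⟩
        intro j' h1 h2; omega
      · have hjk : j ≤ k := by
          rcases Nat.lt_or_ge j (k + 1) with h' | h'
          · omega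
          · have : j = k + 1 := by omega
            subst this; exact absurd hpre hp
        obtain ⟨i, hgo, hji, hprei, hmax⟩ := ih j hjk hpre
        refine ⟨i, ?_, hji, hprei, ?_⟩
        · simpa [PySem.Chars.rfind.go, hp] using hgo
        · intro j' h1 h2
          rcases Nat.lt_or_ge j' (k + 1) with h' | h'
          · exact hmax j' h1 (by omega)
          · have : j' = k + 1 := by omega
            subst this; exact hp

theorem stripChars_append_absorb (x y chars : List Char)
    (hy : ∀ c ∈ y, chars.contains c = true) :
    PySem.Chars.stripChars (x ++ y) chars = PySem.Chars.stripChars x chars := by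
  simp only [PySem.Chars.stripChars]
  by_cases hx : List.dropWhile (fun c => chars.contains c) x = []
  · have hxy : List.dropWhile (fun c => chars.contains c) (x ++ y) = [] := by
      rw [List.dropWhile_append, if_pos (by simpa [List.isEmpty_iff] using hx)]
      exact List.dropWhile_eq_nil_iff.mpr hy
    rw [hx, hxy]
  · rw [List.dropWhile_append, if_neg (by simpa [List.isEmpty_iff] using hx)]
    rw [List.reverse_append]
    rw [List.dropWhile_append, if_pos (by
      simp only [List.isEmpty_iff]
      exact List.dropWhile_eq_nil_iff.mpr (by intro c hc; exact hy c (by simpa using hc)))]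

theorem flat_ends (sep : List Char) :
    ∀ (ts : List (List Char)), ts ≠ [] → ∃ F', ts.flatMap (· ++ sep) = F' ++ sep := by
  intro ts
  induction ts with
  | nil => intro h; exact absurd rfl h
  | cons t ts ih =>
      intro _
      cases ts with
      | nil => exact ⟨t, by simp⟩
      | cons u us =>
          obtain ⟨F', hF'⟩ := ih (by simp)
          exact ⟨t ++ sep ++ F', by simp [hF']⟩

theorem foldl_toList (ts : List String) (sp : String) :
    ∀ init : String, (ts.foldl (fun o t => o ++ t ++ sp) init).toList
      = ts.foldl (fun o t => o ++ t.toList ++ sp.toList) init.toList := by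
  induction ts with
  | nil => intro init; simp
  | cons t ts ih =>
      intro init
      simp only [List.foldl_cons]
      rw [ih]
      simp [String.toList_append]

theorem foldl_append_sep (sp : List Char) (cs : List (List Char)) :
    cs.foldl (fun o t => o ++ t ++ sp) [] = cs.flatMap (· ++ sp) := by
  have h : cs.foldl (fun o t => o ++ t ++ sp) [] = cs.foldl (fun o t => o ++ (t ++ sp)) [] := by
    simp only [List.append_assoc]
  rw [h, PySem.List.foldl_append_eq_flatMap (fun t => t ++ sp) cs []]
  simp

-- A's loop at String level, re-expressed as a flatMap over the char lists of temp.dropLast.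
theorem loopA_toList (temp : List String) (split_at : String) (htemp : temp ≠ []) :
    ((PySem.List.pyRange 0 (PySem.List.len temp - 1) 1).foldl
        (fun output j => output ++ PySem.List.pyGetD temp j "" ++ split_at) "").toList
      = ((temp.map String.toList).dropLast).flatMap (· ++ split_at.toList) := by
  have h1 : PySem.List.len temp - 1 = PySem.List.len temp.dropLast := by
    cases temp with
    | nil => exact absurd rfl htemp
    | cons a t => simp [PySem.List.len]
  rw [h1]
  have h2 : (PySem.List.pyRange 0 (PySem.List.len temp.dropLast) 1).foldl
        (fun output j => output ++ PySem.List.pyGetD temp j "" ++ split_at) ""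
      = (PySem.List.pyRange 0 (PySem.List.len temp.dropLast) 1).foldl
        (fun output j => output ++ PySem.List.pyGetD temp.dropLast j "" ++ split_at) "" := by
    apply PySem.List.foldl_congr_mem
    intro acc j hj
    rw [PySem.List.mem_pyRange_one] at hj
    have hlen : (PySem.List.len temp.dropLast) = (temp.dropLast.length : Int) := by
      simp [PySem.List.len]
    have hj2 : j < (temp.dropLast.length : Int) := by rw [← hlen]; exact hj.2
    have hj3 : j < (temp.length : Int) := by
      have : temp.dropLast.length ≤ temp.length := by simp [List.length_dropLast]
      have := (Int.ofNat_le).mpr this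
      omega
    rw [PySem.List.pyGetD_eq_getElem temp "" hj.1 (by simpa [PySem.List.len] using hj3),
        PySem.List.pyGetD_eq_getElem temp.dropLast "" hj.1 (by simpa [PySem.List.len] using hj2)]
    congr 1
    rw [List.getElem_dropLast]
  rw [h2]
  rw [PySem.List.foldl_pyRange_zero_pyGetD temp.dropLast "" (fun o t => o ++ t ++ split_at) ""]
  rw [foldl_toList]
  have h3 : (temp.map String.toList).dropLast = temp.dropLast.map String.toList := by
    rw [List.map_dropLast]
  rw [h3, ← foldl_append_sep split_at.toList (temp.dropLast.map String.toList),
      List.foldl_map]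
  simp

-- The whole equivalence at the List Char level.
theorem main_chars (s sep : List Char) (hsep : sep ≠ []) :
    PySem.Chars.stripChars (((PySem.Chars.splitOn s sep).dropLast).flatMap (· ++ sep)) sep
      = PySem.Chars.stripChars
          (if PySem.Chars.rfind s sep < 0 then []
           else PySem.Chars.slice s none (some (PySem.Chars.rfind s sep))) sep := by
  rw [splitOn_eq_splitRef s sep hsep]
  have hflat := splitRef_flat sep hsep s []
  simp only [List.reverse_nil, List.nil_append] at hflat
  have hnoOcc := splitRef_last_noOcc sep hsep s [] (by intro j hj; simp at hj)
  obtain ⟨p, ps, hP⟩ := List.exists_cons_of_ne_nil (splitRef_ne_nil sep s [])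
  cases ps with
  | nil =>
      rw [hP] at hflat hnoOcc ⊢
      simp only [List.getLastD_cons, List.getLastD_nil] at hnoOcc
      have hps : p = s := by simpa using hflat
      have hrf : PySem.Chars.rfind s sep = -1 := by
        apply rfind_go_noOcc
        intro j
        rw [← hps]
        exact hnoOcc j
      rw [hrf]
      simp
  | cons q qs =>
      rw [hP] at hflat hnoOcc ⊢
      set LST := (p :: q :: qs).getLastD [] with hLST
      set DL := (p :: q :: qs).dropLast with hDL
      set F := DL.flatMap (· ++ sep) with hF
      have hDLne : DL ≠ [] := by rw [hDL]; simp
      obtain ⟨F', hF'⟩ := flat_ends sep DL hDLne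
      rw [← hF] at hF'
      have hseq : F' ++ (sep ++ LST) = s := by rw [← hflat, hF', List.append_assoc]
      have hocc : sep.isPrefixOf (s.drop F'.length) = true := by
        rw [← hseq, List.drop_left]
        exact List.isPrefixOf_iff_prefix.mpr (List.prefix_append sep LST)
      have hFlen : F.length = F'.length + sep.length := by rw [hF']; simp
      have highNoOcc : ∀ j : Nat, F.length ≤ j → ¬ sep.isPrefixOf (s.drop j) = true := by
        intro j hj
        have hdropj : s.drop j = LST.drop (j - F.length) := by
          rw [← hflat, List.drop_append, List.drop_eq_nil_of_le hj]
          simp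
        rw [hdropj]
        exact hnoOcc _
      have hF'len_le : F'.length ≤ s.length := by
        have hc := congrArg List.length hseq
        simp only [List.length_append] at hc
        omega
      obtain ⟨i, hgo, hge, hprei, hmax⟩ :=
        rfind_go_found s sep s.length F'.length hF'len_le hocc
      have hrf : PySem.Chars.rfind s sep = (i : Int) := hgo
      have hilt : i < F.length := by
        by_contra hcon
        push Not at hcon
        exact highNoOcc i hcon hprei
      rw [hrf, if_neg (by simp)]
      have hslice : PySem.Chars.slice s none (some (i : Int)) = s.take i := by
        rw [PySem.Chars.slice_eq_listSlice, PySem.List.slice_to s (by positivity)]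
        simp
      rw [hslice]
      have htake : s.take i = F' ++ sep.take (i - F'.length) := by
        rw [← hseq, List.take_append, List.take_of_length_le (by omega : F'.length ≤ i),
            List.take_append]
        have hz : i - F'.length - sep.length = 0 := by omega
        rw [hz]
        simp
      rw [htake, hF']
      rw [stripChars_append_absorb F' sep sep
            (by intro c hc; exact List.contains_iff_mem.mpr hc),
          stripChars_append_absorb F' (sep.take (i - F'.length)) sep
            (by intro c hc; exact List.contains_iff_mem.mpr (List.take_subset _ _ hc))]

-- ===== VERDICT (by name: the statement is the Claim_ definition above) =====
theorem split_str_at_last_index_spec : Claim_equal_split_str_at_last_index := by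
  intro str split_at _ hpre
  unfold Spec_split_str_at_last_index
  have hsep : split_at.toList ≠ [] := by
    intro h
    exact hpre (String.toList_inj.mp (by simp [h]))
  have h1 := PySem.Str.split?_map str split_at
  rw [show PySem.Chars.split? str.toList split_at.toList
      = some (PySem.Chars.splitOn str.toList split_at.toList) from by
        simp [PySem.Chars.split?, List.isEmpty_iff, hsep]] at h1
  cases hsp : PySem.Str.split? str split_at with
  | none => rw [hsp] at h1; simp at h1
  | some temps =>
      rw [hsp] at h1
      simp only [Option.map_some, Option.some.injEq] at h1
      have htempsne : temps ≠ [] := by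
        intro h
        rw [h] at h1
        rw [splitOn_eq_splitRef _ _ hsep] at h1
        exact splitRef_ne_nil _ _ _ ((by simpa using h1 : ([] : List (List Char)) = _).symm)
      simp only [split_str_at_last_index, hsp]
      apply String.toList_inj.mp
      rw [PySem.Str.toList_stripChars]
      simp only [split_str_at_last_index_alt]
      rw [PySem.Str.toList_stripChars]
      have hB : (pyRpartitionHead str split_at).toList
          = (if PySem.Chars.rfind str.toList split_at.toList < 0 then []
             else PySem.Chars.slice str.toList none
                    (some (PySem.Chars.rfind str.toList split_at.toList))) := by
        simp only [pyRpartitionHead]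
        by_cases h : PySem.Str.rfind str split_at < 0
        · rw [if_pos h]
          rw [PySem.Str.rfind_eq] at h
          rw [if_pos h]
          simp
        · rw [if_neg h]
          rw [PySem.Str.rfind_eq] at h
          rw [if_neg h]
          rw [PySem.Str.toList_slice]
          congr 2
      rw [hB]
      rw [loopA_toList temps split_at htempsne, h1]
      exact main_chars str.toList split_at.toList hsep
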